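-- pv_equiv track=rewrite | github.com/bitwisecook/tcl-lsp | core/analysis/checks/_style.py | _nearest_valid_mask
-- ===== SOURCE A (Python) =====
-- def _nearest_valid_mask(a: int, b: int, c: int, d: int) -> str | None:
--     """Suggest the closest valid contiguous mask for an invalid one."""
--     val = (a << 24) | (b << 16) | (c << 8) | d
--     # Count the leading 1-bits.
--     leading = 0
--     for bit in range(31, -1, -1):
--         if val & (1 << bit):
--             leading += 1
--         else:
--             break
--     if leading == 0 or leading == 32:
--         return None
--     candidate = (0xFFFFFFFF << (32 - leading)) & 0xFFFFFFFF
--     return (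
--         f"{(candidate >> 24) & 0xFF}."
--         f"{(candidate >> 16) & 0xFF}."
--         f"{(candidate >> 8) & 0xFF}."
--         f"{candidate & 0xFF}"
--     )
-- ===== SOURCE B (Python) =====
-- def _nearest_valid_mask(a: int, b: int, c: int, d: int) -> str | None:
--     """Suggest the closest valid contiguous mask for an invalid one."""
--     val = ((a << 24) | (b << 16) | (c << 8) | d) & 0xFFFFFFFF
--     # Leading ones of val == leading zeros (within 32 bits) of its complement.
--     leading = 32 - (~val & 0xFFFFFFFF).bit_length()
--     if leading == 0 or leading == 32:
--         return None
--     # Assemble the dotted quad octet-wise: full 255s, one partial octet, zeros.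
--     q, r = divmod(leading, 8)
--     octets = [255] * q + ([(0xFF << (8 - r)) & 0xFF] if r else [])
--     octets += [0] * (4 - len(octets))
--     return ".".join(str(o) for o in octets)
-- ===== Notes on version B (the rewrite author's own statement) =====
-- stated objective: simpler
-- what changed: Replaced the 32-iteration descending leading-one-bit counting loop with a closed-form bit_length computation on the inverted 32-bit value, and assembled the dotted quad octet-wise (full 255s, one partial octet, zeros) instead of slicing a single 32-bit candidate by shifts.
import Mathlib
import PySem

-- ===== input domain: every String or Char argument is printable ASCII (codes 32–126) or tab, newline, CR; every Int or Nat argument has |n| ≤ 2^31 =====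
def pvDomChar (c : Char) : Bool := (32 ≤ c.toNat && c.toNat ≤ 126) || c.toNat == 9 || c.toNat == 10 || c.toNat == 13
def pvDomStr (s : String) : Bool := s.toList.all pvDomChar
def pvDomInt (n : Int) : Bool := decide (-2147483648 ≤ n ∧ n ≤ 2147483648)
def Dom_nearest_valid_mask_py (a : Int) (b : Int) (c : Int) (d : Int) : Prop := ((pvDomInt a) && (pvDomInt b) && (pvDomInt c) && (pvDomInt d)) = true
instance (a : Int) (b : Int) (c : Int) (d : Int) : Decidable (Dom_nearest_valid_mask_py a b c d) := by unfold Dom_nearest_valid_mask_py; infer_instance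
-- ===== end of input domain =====

-- B replaces A's descending leading-1-bit counting loop by a closed-form bit_length computation
-- and assembles the dotted quad octet-wise (full 255s, one partial octet, zeros) instead of
-- slicing one 32-bit candidate; objective: simpler (no loop), same cost.

-- ===== PORT A =====
-- 'for bit in range(31, -1, -1): if val & (1 << bit): leading += 1 else: break'
-- ported as structural recursion over the range list; the 'break' is the else-branch stopping.
-- bit.toNat is exact: every element of range(31,-1,-1) is nonnegative.
def pvLoopA (val : Int) : List Int → Int
  | [] => 0
  | bit :: rest =>
    if PySem.Int.band val ((1 : Int) <<< bit.toNat) ≠ 0 then 1 + pvLoopA val rest else 0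

def nearest_valid_mask_py (a : Int) (b : Int) (c : Int) (d : Int) : Option String :=
  let val := PySem.Int.bor (PySem.Int.bor (PySem.Int.bor (a <<< 24) (b <<< 16)) (c <<< 8)) d
  let leading := pvLoopA val (PySem.List.pyRange 31 (-1) (-1))
  if leading = 0 ∨ leading = 32 then none
  else
    -- (32 - leading).toNat is exact: leading ≤ 32 (the loop counts at most 32 bits)
    let candidate := PySem.Int.band ((4294967295 : Int) <<< (32 - leading).toNat) 4294967295
    some (PySem.Int.toStr (PySem.Int.band (candidate >>> 24) 255) ++ "." ++
          PySem.Int.toStr (PySem.Int.band (candidate >>> 16) 255) ++ "." ++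
          PySem.Int.toStr (PySem.Int.band (candidate >>> 8) 255) ++ "." ++
          PySem.Int.toStr (PySem.Int.band candidate 255))

-- ===== PORT B =====
-- q, r = divmod(leading, 8) ported with floordiv/mod (the divisor is the nonzero literal 8: exact).
-- [255] * q ported as List.replicate q.toNat (Python's list-repeat clamps negatives to [], as toNat does);
-- (8 - r).toNat is exact: 0 ≤ r < 8.
def nearest_valid_mask_py_alt (a : Int) (b : Int) (c : Int) (d : Int) : Option String :=
  let val := PySem.Int.band (PySem.Int.bor (PySem.Int.bor (PySem.Int.bor (a <<< 24) (b <<< 16)) (c <<< 8)) d) 4294967295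
  let leading : Int := 32 - (PySem.Int.bitLength (PySem.Int.band (Int.not val) 4294967295) : Int)
  if leading = 0 ∨ leading = 32 then none
  else
    let q := PySem.Int.floordiv leading 8
    let r := PySem.Int.mod leading 8
    let octets := List.replicate q.toNat (255 : Int) ++
      (if r ≠ 0 then [PySem.Int.band ((255 : Int) <<< (8 - r).toNat) 255] else [])
    let octets2 := octets ++ List.replicate (4 - octets.length) (0 : Int)
    some (PySem.Str.join "." (octets2.map PySem.Int.toStr))

-- ===== PRECONDITION & SPEC =====
def Spec_nearest_valid_mask_py (a : Int) (b : Int) (c : Int) (d : Int) (out : Option String) : Prop := out = nearest_valid_mask_py_alt a b c d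
instance (a : Int) (b : Int) (c : Int) (d : Int) (out : Option String) : Decidable (Spec_nearest_valid_mask_py a b c d out) := by unfold Spec_nearest_valid_mask_py; infer_instance

-- ===== CLAIM (what is proved, stated in full; the proofs are below) =====
def Claim_equal_nearest_valid_mask_py : Prop := ∀ (a : Int) (b : Int) (c : Int) (d : Int), Dom_nearest_valid_mask_py a b c d → Spec_nearest_valid_mask_py a b c d (nearest_valid_mask_py a b c d)

-- ===== LEMMAS AND PROOFS =====

-- the low 32 bits of the complement of val, as a natural number
def pvC (val : Int) : Nat := (PySem.Int.band (Int.not val) 4294967295).toNat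

theorem pvNotEq (a : Int) : Int.not a = -a - 1 := by
  cases a <;> simp [Int.not] <;> omega

-- complement within n bits, bitwise
theorem pvComplTestBit (i : Nat) : ∀ (n x : Nat), x < 2 ^ n →
    (2 ^ n - 1 - x).testBit i = (decide (i < n) && !x.testBit i) := by
  induction i with
  | zero =>
    intro n x hx
    cases n with
    | zero => interval_cases x; simp
    | succ m =>
      have hp : 0 < 2 ^ m := Nat.two_pow_pos m
      rw [Nat.pow_succ] at hx ⊢
      simp only [Nat.testBit_zero]
      have : (2 ^ m * 2 - 1 - x) % 2 = 1 - x % 2 := by omega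
      rw [this]
      rcases Nat.mod_two_eq_zero_or_one x with h | h <;> simp [h]
  | succ i ih =>
    intro n x hx
    cases n with
    | zero => interval_cases x; simp
    | succ m =>
      have hp : 0 < 2 ^ m := Nat.two_pow_pos m
      rw [Nat.pow_succ] at hx
      have hdiv : (2 ^ (m + 1) - 1 - x) / 2 = 2 ^ m - 1 - x / 2 := by
        rw [Nat.pow_succ]; omega
      rw [Nat.testBit_succ, hdiv, ih m (x / 2) (by omega), Nat.testBit_succ]
      simp

theorem pvTofNat : (4294967295 : Int).toNat = 2 ^ 32 - 1 := by decide

theorem pvBandNotNonneg (val : Int) (h : 0 ≤ val) :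
    PySem.Int.band (Int.not val) 4294967295 = ((4294967295 - val.toNat % 4294967296 : Nat) : Int) := by
  have h1 : ¬ (0 ≤ Int.not val) := by rw [pvNotEq]; omega
  have h2 : -Int.not val - 1 = val := by rw [pvNotEq]; ring
  rw [PySem.Int.band, if_neg h1, if_pos (by norm_num : (0:Int) ≤ 4294967295), h2, pvTofNat,
    Nat.land_comm, Nat.and_two_pow_sub_one_eq_mod]
  norm_num

theorem pvBandNotNeg (val : Int) (h : val < 0) :
    PySem.Int.band (Int.not val) 4294967295 = (((-val - 1).toNat % 4294967296 : Nat) : Int) := by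
  have h1 : 0 ≤ Int.not val := by rw [pvNotEq]; omega
  rw [PySem.Int.band, if_pos h1, if_pos (by norm_num : (0:Int) ≤ 4294967295), pvTofNat,
    Nat.and_two_pow_sub_one_eq_mod, pvNotEq]

theorem pvC_lt (val : Int) : pvC val < 4294967296 := by
  unfold pvC
  rcases (by omega : 0 ≤ val ∨ val < 0) with h | h
  · rw [pvBandNotNonneg val h]; simp only [Int.toNat_natCast]; omega
  · rw [pvBandNotNeg val h]; simp only [Int.toNat_natCast]; omega

-- the loop's bit test, read on the complement's bits
theorem pvTest (val : Int) (j : Nat) (hj : j < 32) :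
    (PySem.Int.band val ((2 : Int) ^ j) ≠ 0) ↔ (pvC val).testBit j = false := by
  have hpow : ((2 : Int) ^ j).toNat = 2 ^ j := by
    have : ((2 : Int) ^ j) = ((2 ^ j : Nat) : Int) := by push_cast; ring
    rw [this, Int.toNat_natCast]
  rcases (by omega : 0 ≤ val ∨ val < 0) with h | h
  · have hb : PySem.Int.band val ((2 : Int) ^ j) = ((val.toNat &&& 2 ^ j : Nat) : Int) := by
      rw [PySem.Int.band, if_pos h, if_pos (by positivity), hpow]
    have hC : pvC val = 2 ^ 32 - 1 - val.toNat % 2 ^ 32 := by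
      unfold pvC; rw [pvBandNotNonneg val h]; simp only [Int.toNat_natCast]; omega
    rw [hb, hC, pvComplTestBit j 32 (val.toNat % 2 ^ 32) (Nat.mod_lt _ (by positivity)),
      Nat.testBit_mod_two_pow, Nat.and_two_pow]
    cases hbit : val.toNat.testBit j
    · simp [hbit, hj]
    · simp [hbit, hj]
  · have hb : PySem.Int.band val ((2 : Int) ^ j) =
        ((2 ^ j - (2 ^ j &&& (-val - 1).toNat) : Nat) : Int) := by
      rw [PySem.Int.band, if_neg (by omega), if_pos (by positivity), hpow]
    have hC : pvC val = (-val - 1).toNat % 2 ^ 32 := by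
      unfold pvC; rw [pvBandNotNeg val h]; simp only [Int.toNat_natCast]; omega
    rw [hb, hC, Nat.testBit_mod_two_pow, Nat.land_comm, Nat.and_two_pow]
    cases hbit : (-val - 1).toNat.testBit j
    · simp [hbit, hj]
    · simp [hbit, hj]

-- B's argument to bit_length equals the complement of the masked value: the same pvC
theorem pvBridge (val : Int) :
    PySem.Int.band (Int.not (PySem.Int.band val 4294967295)) 4294967295 = ((pvC val : Nat) : Int) := by
  rcases (by omega : 0 ≤ val ∨ val < 0) with h | h
  · have hb : PySem.Int.band val 4294967295 = ((val.toNat % 4294967296 : Nat) : Int) := by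
      rw [PySem.Int.band, if_pos h, if_pos (by norm_num : (0:Int) ≤ 4294967295), pvTofNat,
        Nat.and_two_pow_sub_one_eq_mod]
    rw [hb, pvBandNotNonneg _ (by positivity)]
    unfold pvC
    rw [pvBandNotNonneg val h]
    simp only [Int.toNat_natCast]
    omega
  · have hb : PySem.Int.band val 4294967295 =
        ((4294967295 - (-val - 1).toNat % 4294967296 : Nat) : Int) := by
      rw [PySem.Int.band, if_neg (by omega), if_pos (by norm_num : (0:Int) ≤ 4294967295), pvTofNat,
        Nat.land_comm, Nat.and_two_pow_sub_one_eq_mod]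
      norm_num
    rw [hb, pvBandNotNonneg _ (by positivity)]
    unfold pvC
    rw [pvBandNotNeg val h]
    simp only [Int.toNat_natCast]
    omega

theorem pvBitLength_le (m k : Nat) (h : m < 2 ^ k) : PySem.Int.bitLength (m : Int) ≤ k := by
  rcases Nat.eq_zero_or_pos m with h0 | h0
  · subst h0; simp [PySem.Int.bitLength_zero]
  · by_contra hc
    push_neg at hc
    have h2 := PySem.Int.two_pow_bitLength_le (m : Int) (by exact_mod_cast h0.ne')
    rw [Int.natAbs_natCast] at h2
    have : 2 ^ k ≤ 2 ^ (PySem.Int.bitLength (m : Int) - 1) := Nat.pow_le_pow_right (by norm_num) (by omega)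
    omega

theorem pvBitLength_eq (m k : Nat) (h1 : 2 ^ k ≤ m) (h2 : m < 2 ^ (k + 1)) :
    PySem.Int.bitLength (m : Int) = k + 1 := by
  have hle := pvBitLength_le m (k + 1) h2
  have hlt := PySem.Int.lt_two_pow_bitLength (m : Int)
  rw [Int.natAbs_natCast] at hlt
  by_contra hc
  have : PySem.Int.bitLength (m : Int) ≤ k := by omega
  have : 2 ^ PySem.Int.bitLength (m : Int) ≤ 2 ^ k := Nat.pow_le_pow_right (by norm_num) this
  omega

-- the loop counts the leading ones of val = k minus the bit length of the k-bit complement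
theorem pvMain (val : Int) : ∀ k : Nat, k ≤ 32 →
    pvLoopA val (PySem.List.pyRange ((k : Int) - 1) (-1) (-1)) =
      (k : Int) - (PySem.Int.bitLength ((pvC val % 2 ^ k : Nat) : Int) : Int) := by
  intro k
  induction k with
  | zero =>
    intro _
    rw [PySem.List.pyRange_neg_one_eq_nil (by norm_num)]
    simp [pvLoopA, PySem.Int.bitLength_zero]
  | succ k ih =>
    intro hk
    have hk' : k ≤ 32 := by omega
    have hjk : k < 32 := by omega
    have hcast : ((k + 1 : Nat) : Int) - 1 = (k : Int) := by push_cast; ring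
    rw [hcast, PySem.List.pyRange_neg_one_cons (by omega : (-1 : Int) < (k : Int))]
    simp only [pvLoopA]
    have hsh : (1 : Int) <<< ((k : Int)).toNat = 2 ^ k := by
      rw [Int.toNat_natCast, Int.shiftLeft_eq, one_mul]
    rw [hsh]
    have hpos : 0 < 2 ^ k := Nat.two_pow_pos k
    have hmod : pvC val % 2 ^ (k + 1) =
        pvC val % 2 ^ k + 2 ^ k * ((pvC val).testBit k).toNat := by
      rw [Nat.mod_pow_succ, Nat.testBit_eq_decide_div_mod_eq]
      rcases Nat.mod_two_eq_zero_or_one (pvC val / 2 ^ k) with h | h <;> simp [h]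
    cases hb : (pvC val).testBit k
    case true =>
      rw [if_neg (by rw [pvTest val k hjk]; simp [hb])]
      have h1 : pvC val % 2 ^ (k + 1) = pvC val % 2 ^ k + 2 ^ k := by
        rw [hmod, hb]; simp
      have h2 : PySem.Int.bitLength ((pvC val % 2 ^ (k + 1) : Nat) : Int) = k + 1 := by
        apply pvBitLength_eq
        · omega
        · have := Nat.mod_lt (pvC val) hpos
          rw [h1, Nat.pow_succ]; omega
      rw [h2]
      push_cast
      ring
    case false =>
      rw [if_pos (by rw [pvTest val k hjk]; exact hb)]
      have h1 : pvC val % 2 ^ (k + 1) = pvC val % 2 ^ k := by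
        rw [hmod, hb]; simp
      rw [h1, ih hk']
      have hle := pvBitLength_le (pvC val % 2 ^ k) k (Nat.mod_lt _ hpos)
      push_cast
      omega

theorem pvMain32 (val : Int) :
    pvLoopA val (PySem.List.pyRange 31 (-1) (-1)) =
      32 - (PySem.Int.bitLength ((pvC val : Nat) : Int) : Int) := by
  have h := pvMain val 32 (le_refl 32)
  have h1 : ((32 : Nat) : Int) - 1 = (31 : Int) := by norm_num
  have h2 : pvC val % 2 ^ 32 = pvC val := Nat.mod_eq_of_lt (by have := pvC_lt val; omega)
  rw [h1, h2] at h
  rw [h]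
  norm_num

theorem pvEqual (a b c d : Int) : nearest_valid_mask_py a b c d = nearest_valid_mask_py_alt a b c d := by
  simp only [nearest_valid_mask_py, nearest_valid_mask_py_alt]
  rw [pvMain32, pvBridge]
  have hL : PySem.Int.bitLength ((pvC (PySem.Int.bor (PySem.Int.bor (PySem.Int.bor (a <<< 24) (b <<< 16)) (c <<< 8)) d) : Nat) : Int) ≤ 32 := by
    apply pvBitLength_le
    have := pvC_lt (PySem.Int.bor (PySem.Int.bor (PySem.Int.bor (a <<< 24) (b <<< 16)) (c <<< 8)) d)
    norm_num
    omega
  generalize hg : PySem.Int.bitLength ((pvC (PySem.Int.bor (PySem.Int.bor (PySem.Int.bor (a <<< 24) (b <<< 16)) (c <<< 8)) d) : Nat) : Int) = L at hL ⊢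
  interval_cases L <;> decide

-- ===== VERDICT (by name: the statement is the Claim_ definition above) =====
theorem nearest_valid_mask_py_spec : Claim_equal_nearest_valid_mask_py := by
  intro a b c d _
  unfold Spec_nearest_valid_mask_py
  exact pvEqual a b c d
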